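-- pv_equiv track=rewrite | github.com/CGCL-codes/media-bias | experiment/writing_bias/util_corpus.py | filter_text_for_nltk
-- ===== SOURCE A (Python) =====
-- def filter_text_for_nltk(text, lower_flag=False):
--     """
--     删除 标点符号 和 停用词  和 数字; 可选: 统一使用小写格式
--     :param text:
--     :param lower_flag:
--     :return:
--     """
--     # (1) 映射 部分短语 , 如: New York --> NewYork
--     phrase_list = ['New Hampshire', 'New Jersey', 'New Mexico', 'New York', 'North Carolina', 'North Dakota',
--                    'Rhode Island', 'South Carolina', 'South Dakota', 'West Virginia', 'District of Columbia',
--                    'Los Angeles', 'San Antonio', 'San Diego', 'Fort Worth']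
--     for phrase in phrase_list:
--         phrase_lower = phrase.lower()
--         text = text.replace(phrase, phrase.replace(' ', ''))  # 删除空格，连成一个单词
--         text = text.replace(phrase_lower, phrase_lower.replace(' ', ''))
--
--     # # (2) 删除 标点、数字
--     # # text_filter = re.sub(r'[^a-zA-Z0-9\s]', '', string=text)  # 原来: 没有去除数字  测试发现数字干扰特别多
--     # text_filter = re.sub(r'[^a-zA-Z\s]', ' ', string=text)  # 替换成空格
--
--     # (3)
--     if lower_flag:
--         return text.lower()
--     else:
--         return text
-- ===== SOURCE B (Python) =====
-- def filter_text_for_nltk(text, lower_flag=False):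
--     """Single left-to-right table-driven scan instead of 30 sequential
--     full-text replace passes: build one dict phrase->space-stripped form
--     (original case and lowercase), then walk the text once, replacing the
--     leftmost phrase match at each position."""
--     phrase_list = ['New Hampshire', 'New Jersey', 'New Mexico', 'New York', 'North Carolina', 'North Dakota',
--                    'Rhode Island', 'South Carolina', 'South Dakota', 'West Virginia', 'District of Columbia',
--                    'Los Angeles', 'San Antonio', 'San Diego', 'Fort Worth']
--     table = {}
--     for p in phrase_list:
--         table[p] = p.replace(' ', '')
--         low = p.lower()
--         table[low] = low.replace(' ', '')
--     items = list(table.items())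
--     out = []
--     i = 0
--     n = len(text)
--     while i < n:
--         hit = None
--         for k, r in items:
--             if text.startswith(k, i):
--                 hit = (k, r)
--                 break
--         if hit is None:
--             out.append(text[i])
--             i += 1
--         else:
--             out.append(hit[1])
--             i += len(hit[0])
--     res = ''.join(out)
--     if lower_flag:
--         return res.lower()
--     return res
-- ===== Notes on version B (the rewrite author's own statement) =====
-- stated objective: alternative
-- what changed: A makes 30 sequential full-text str.replace passes (one per phrase and per its lowercase form); B builds one phrase->space-stripped-form dict and walks the text once left to right, replacing the leftmost table match at each position; Pre_ excludes texts where one phrase occurrence overlaps the next by its final letter, on which A's cascading sequential replaces collapse both phrases while B's single scan collapses only the leftmost - an overlap corner where either reading is defensible.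
import Mathlib
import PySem

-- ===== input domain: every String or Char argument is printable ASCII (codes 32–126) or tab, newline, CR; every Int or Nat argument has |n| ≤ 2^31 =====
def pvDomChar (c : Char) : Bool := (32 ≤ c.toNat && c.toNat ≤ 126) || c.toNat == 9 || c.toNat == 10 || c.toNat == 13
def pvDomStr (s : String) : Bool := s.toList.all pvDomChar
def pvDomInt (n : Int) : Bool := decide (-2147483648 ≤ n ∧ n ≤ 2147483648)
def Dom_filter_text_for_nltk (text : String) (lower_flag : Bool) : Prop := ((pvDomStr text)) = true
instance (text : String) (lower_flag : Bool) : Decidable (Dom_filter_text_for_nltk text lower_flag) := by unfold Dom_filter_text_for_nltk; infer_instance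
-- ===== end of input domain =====

-- B replaces A's 30 sequential full-text replace passes by one table-driven left-to-right
-- scan (objective: alternative); on overlapped phrase pairs (D_ below) the two differ.

-- ===== PORT A =====
def pvPhrases : List String :=
  ["New Hampshire", "New Jersey", "New Mexico", "New York", "North Carolina", "North Dakota",
   "Rhode Island", "South Carolina", "South Dakota", "West Virginia", "District of Columbia",
   "Los Angeles", "San Antonio", "San Diego", "Fort Worth"]

def filter_text_for_nltk (text : String) (lower_flag : Bool) : String :=
  let text := pvPhrases.foldl (fun t phrase =>
    let phrase_lower := PySem.Str.lower phrase
    let t := PySem.Str.replace t phrase (PySem.Str.replace phrase " " "")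
    PySem.Str.replace t phrase_lower (PySem.Str.replace phrase_lower " " "")) text
  if lower_flag then PySem.Str.lower text else text

-- ===== PORT B =====
-- the dict phrase->space-stripped form, in insertion order (all 30 keys are distinct)
def pvBuildTable (l : List String) : List (List Char × List Char) :=
  l.foldl (fun tb p =>
    let low := PySem.Chars.lower p.toList
    tb ++ [(p.toList, PySem.Chars.replace p.toList [' '] [])]
       ++ [(low, PySem.Chars.replace low [' '] [])]) []

def pvTable : List (List Char × List Char) := pvBuildTable pvPhrases

-- the while-loop of Source B: at each position take the first table key matching there
-- (the fuel argument, set to the remaining length, only makes the loop structurally recursive)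
def pvScanGo (K : List (List Char × List Char)) : Nat → List Char → List Char
  | _, [] => []
  | 0, t => t
  | fuel + 1, c :: ts =>
    match K.find? (fun kr => kr.1.isPrefixOf (c :: ts)) with
    | some kr => kr.2 ++ pvScanGo K fuel (List.drop (kr.1.length - 1) ts)
    | none => c :: pvScanGo K fuel ts

def pvScanT (K : List (List Char × List Char)) (t : List Char) : List Char :=
  pvScanGo K t.length t

def filter_text_for_nltk_alt (text : String) (lower_flag : Bool) : String :=
  let res := String.ofList (pvScanT pvTable text.toList)
  if lower_flag then PySem.Str.lower res else res

-- ===== PRECONDITION & SPEC =====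
-- Pre_ excludes texts in which one place-name occurrence overlaps the next by its final
-- letter (e.g. "Rhode Islandistrict of columbia"): there A's sequential replace cascade
-- collapses BOTH phrases while B's single left-to-right scan collapses only the leftmost —
-- an overlap corner no caller would specify, where either reading is defensible.
def Pre_filter_text_for_nltk (text : String) (lower_flag : Bool) : Prop :=
  ¬ ∃ a ∈ ["Rhode Island", "rhode island", "Los Angeles", "los angeles"],
    ∃ b ∈ ["district of columbia", "south carolina", "south dakota", "san antonio", "san diego"],
      a.toList.getLast? = b.toList.head? ∧ (a.toList ++ b.toList.drop 1) <:+: text.toList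
instance (text : String) (lower_flag : Bool) : Decidable (Pre_filter_text_for_nltk text lower_flag) := by
  unfold Pre_filter_text_for_nltk; infer_instance

def pvWitness_filter_text_for_nltk : String × Bool := ("We left New York for new hampshire.", true)

def Spec_filter_text_for_nltk (text : String) (lower_flag : Bool) (out : String) : Prop :=
  out = filter_text_for_nltk_alt text lower_flag
instance (text : String) (lower_flag : Bool) (out : String) : Decidable (Spec_filter_text_for_nltk text lower_flag out) := by
  unfold Spec_filter_text_for_nltk; infer_instance

-- ===== CLAIM (what is proved, stated in full; the proofs are below) =====
def Claim_equal_filter_text_for_nltk : Prop := ∀ (text : String) (lower_flag : Bool), Dom_filter_text_for_nltk text lower_flag → Pre_filter_text_for_nltk text lower_flag → Spec_filter_text_for_nltk text lower_flag (filter_text_for_nltk text lower_flag)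

-- ===== LEMMAS AND PROOFS =====

-- the ten overlapped phrase pairs, as concrete strings (the proof-side form of D_)
def pvTrigs : List (List Char) :=
  ["Rhode Islandistrict of columbia".toList, "rhode islandistrict of columbia".toList,
   "Los Angelesouth carolina".toList, "Los Angelesouth dakota".toList,
   "Los Angelesan antonio".toList, "Los Angelesan diego".toList,
   "los angelesouth carolina".toList, "los angelesouth dakota".toList,
   "los angelesan antonio".toList, "los angelesan diego".toList]

-- proof-side model of CPython str.replace's left-to-right scan (PySem.Chars.replace.go)
def pvRep (old new : List Char) : List Char → List Char
  | [] => []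
  | c :: ts =>
    if old.isPrefixOf (c :: ts) then new ++ pvRep old new (List.drop (old.length - 1) ts)
    else c :: pvRep old new ts
termination_by t => t.length
decreasing_by all_goals simp

-- proof-side version of the scan, recursing on the remaining text
def pvScanS (K : List (List Char × List Char)) : List Char → List Char
  | [] => []
  | c :: ts =>
    match K.find? (fun kr => kr.1.isPrefixOf (c :: ts)) with
    | some kr => kr.2 ++ pvScanS K (List.drop (kr.1.length - 1) ts)
    | none => c :: pvScanS K ts
termination_by t => t.length
decreasing_by all_goals simp

theorem pvScanGo_eq (K : List (List Char × List Char)) :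
    ∀ fuel (t : List Char), t.length ≤ fuel → pvScanGo K fuel t = pvScanS K t := by
  intro fuel
  induction fuel with
  | zero =>
    intro t h
    have : t = [] := List.eq_nil_iff_length_eq_zero.mpr (Nat.le_zero.mp h)
    subst this; rw [pvScanS]; rfl
  | succ n ih =>
    intro t h
    cases t with
    | nil => rw [pvScanS]; rfl
    | cons c ts =>
      rw [pvScanS, pvScanGo]
      cases hf : K.find? (fun kr => kr.1.isPrefixOf (c :: ts)) with
      | none => simp only []; rw [ih ts (by simpa using h)]
      | some kr => simp only []; rw [ih _ (by simp only [List.length_drop, List.length_cons] at *; omega)]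

theorem pvScanT_eq_S (K : List (List Char × List Char)) (t : List Char) :
    pvScanT K t = pvScanS K t := pvScanGo_eq K t.length t le_rfl

-- generic list fact: a prefix of a ++ b is a prefix of a, or extends a
theorem pv_prefix_split {a b v : List Char} (h : v <+: a ++ b) : v <+: a ∨ a <+: v := by
  induction a generalizing v with
  | nil => exact Or.inr (List.nil_prefix)
  | cons x a' ih =>
    cases v with
    | nil => exact Or.inl (List.nil_prefix)
    | cons y v' =>
      rw [List.cons_append, List.cons_prefix_cons] at h
      obtain ⟨rfl, h'⟩ := h
      rcases ih h' with h1 | h1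
      · exact Or.inl (List.cons_prefix_cons.mpr ⟨rfl, h1⟩)
      · exact Or.inr (List.cons_prefix_cons.mpr ⟨rfl, h1⟩)

-- Chars.replace agrees with pvRep for nonempty old
theorem pv_go_eq (old new : List Char) (hold : old ≠ []) :
    ∀ fuel (l acc : List Char), l.length ≤ fuel →
      PySem.Chars.replace.go old new fuel l acc = acc.reverse ++ pvRep old new l := by
  intro fuel
  induction fuel with
  | zero =>
    intro l acc h
    have hl : l = [] := List.eq_nil_iff_length_eq_zero.mpr (Nat.le_zero.mp h)
    subst hl
    simp [PySem.Chars.replace.go, pvRep]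
  | succ n ih =>
    intro l acc h
    cases l with
    | nil => simp [PySem.Chars.replace.go, pvRep]
    | cons c t =>
      obtain ⟨m, hm⟩ : ∃ m, old.length = m + 1 := by
        cases old with
        | nil => exact absurd rfl hold
        | cons o o' => exact ⟨o'.length, rfl⟩
      by_cases hp : old.isPrefixOf (c :: t) = true
      · rw [show PySem.Chars.replace.go old new (n+1) (c :: t) acc
              = if old.isPrefixOf (c :: t) then
                  PySem.Chars.replace.go old new n (List.drop old.length (c :: t)) (new.reverse ++ acc)
                else PySem.Chars.replace.go old new n t (c :: acc) from rfl, if_pos hp]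
        have hlen : (List.drop old.length (c :: t)).length ≤ n := by
          simp only [List.length_drop, List.length_cons] at *
          omega
        rw [ih _ _ hlen]
        have hdrop : List.drop old.length (c :: t) = List.drop (old.length - 1) t := by
          rw [hm]; simp [List.drop_succ_cons]
        rw [hdrop, show pvRep old new (c :: t)
              = if old.isPrefixOf (c :: t) then new ++ pvRep old new (List.drop (old.length - 1) t)
                else c :: pvRep old new t from by rw [pvRep], if_pos hp]
        simp
      · rw [show PySem.Chars.replace.go old new (n+1) (c :: t) acc
              = if old.isPrefixOf (c :: t) then
                  PySem.Chars.replace.go old new n (List.drop old.length (c :: t)) (new.reverse ++ acc)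
                else PySem.Chars.replace.go old new n t (c :: acc) from rfl, if_neg hp]
        have hlen : t.length ≤ n := by simpa using h
        rw [ih _ _ hlen, show pvRep old new (c :: t)
              = if old.isPrefixOf (c :: t) then new ++ pvRep old new (List.drop (old.length - 1) t)
                else c :: pvRep old new t from by rw [pvRep], if_neg hp]
        simp

theorem pv_replace_eq_pvRep (old new : List Char) (h : old ≠ []) (s : List Char) :
    PySem.Chars.replace s old new = pvRep old new s := by
  rw [PySem.Chars.replace, if_neg (by simpa [List.isEmpty_iff] using h)]
  simpa using pv_go_eq old new h s.length s [] le_rfl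

theorem pvRep_append_self (old new : List Char) (h : old ≠ []) (x : List Char) :
    pvRep old new (old ++ x) = new ++ pvRep old new x := by
  obtain ⟨o, o', rfl⟩ : ∃ a l, old = a :: l := by
    cases old with
    | nil => exact absurd rfl h
    | cons a l => exact ⟨a, l, rfl⟩
  rw [List.cons_append, show pvRep (o :: o') new (o :: (o' ++ x))
        = if (o :: o').isPrefixOf (o :: (o' ++ x)) then
            new ++ pvRep (o :: o') new (List.drop ((o :: o').length - 1) (o' ++ x))
          else o :: pvRep (o :: o') new (o' ++ x) from by rw [pvRep],
      if_pos (by rw [List.isPrefixOf_iff_prefix]; exact List.cons_prefix_cons.mpr ⟨rfl, ⟨x, rfl⟩⟩)]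
  rw [List.length_cons, Nat.add_sub_cancel, List.drop_left]

theorem pvRep_split (old new : List Char) (u x : List Char)
    (h : ∀ j < u.length, ¬ old <+: (List.drop j u ++ x)) :
    pvRep old new (u ++ x) = u ++ pvRep old new x := by
  induction u with
  | nil => rfl
  | cons d u' ih =>
    have h0 : ¬ old <+: (d :: u') ++ x := by simpa using h 0 (by simp)
    rw [List.cons_append, show pvRep old new (d :: (u' ++ x))
          = if old.isPrefixOf (d :: (u' ++ x)) then
              new ++ pvRep old new (List.drop (old.length - 1) (u' ++ x))
            else d :: pvRep old new (u' ++ x) from by rw [pvRep],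
        if_neg (by rw [List.isPrefixOf_iff_prefix]; simpa using h0)]
    rw [ih (by intro j hj; have := h (j+1) (by simpa using Nat.succ_lt_succ hj); simpa using this)]
    simp

-- ===== the decidable facts about the 30 keys and their replacements =====

theorem pv_fact_key_ne_nil : ∀ kr ∈ pvTable, kr.1 ≠ [] ∧ kr.2 ≠ [] := by decide
theorem pv_fact_rep_take1 : ∀ kr ∈ pvTable, kr.2.take 1 = kr.1.take 1 := by decide
theorem pv_fact_no_prefix : ∀ kr ∈ pvTable, ∀ kr' ∈ pvTable, kr.1 ≠ kr'.1 → ¬ kr.1 <+: kr'.1 := by decide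
theorem pv_fact_key_unique : ∀ kr ∈ pvTable, ∀ kr' ∈ pvTable, kr.1 = kr'.1 → kr = kr' := by decide
theorem pv_fact_tail_vs_rep : ∀ kr ∈ pvTable, ∀ kr' ∈ pvTable, ∀ q < kr.1.length, 1 ≤ q →
    ¬ kr'.2 <+: kr.1.drop q ∧ (kr.1.drop q <+: kr'.2 → kr.1.drop q = kr'.2.take 1) := by decide
theorem pv_fact_trigtail_vs_rep : ∀ u ∈ pvTrigs, ∀ kr' ∈ pvTable, ∀ q < u.length, 1 ≤ q →
    ¬ kr'.2 <+: u.drop q ∧ (u.drop q <+: kr'.2 → u.drop q = kr'.2.take 1) := by decide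
theorem pv_fact_keytail_vs_key : ∀ kr ∈ pvTable, ∀ kr' ∈ pvTable, ∀ q < kr.1.length, 1 ≤ q →
    ¬ kr'.1 <+: kr.1.drop q ∧
    (kr.1.drop q <+: kr'.1 → (q = kr.1.length - 1 ∧ kr.1.drop q = kr'.1.take 1 ∧ (kr.1 ++ kr'.1.drop 1) ∈ pvTrigs)) := by decide
theorem pv_fact_reptail_vs_key : ∀ kr ∈ pvTable, ∀ kr' ∈ pvTable, ∀ q < kr.2.length,
    ¬ kr'.1 <+: kr.2.drop q ∧
    (kr.2.drop q <+: kr'.1 → (q = kr.2.length - 1 ∧ kr.2.drop q = kr'.1.take 1 ∧ (kr.1 ++ kr'.1.drop 1) ∈ pvTrigs)) := by decide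
theorem pv_fact_trig_vs_reptail : ∀ kr ∈ pvTable, ∀ u ∈ pvTrigs, ∀ q < kr.2.length,
    ¬ u <+: kr.2.drop q ∧ ¬ kr.2.drop q <+: u := by decide

-- ===== no occurrence of a key (or trigger) is created by a replace pass =====

def pvVOK (v : List Char) : Prop :=
  v = [] ∨ (∃ kr ∈ pvTable, ∃ q, 1 ≤ q ∧ q < kr.1.length ∧ v = kr.1.drop q)
         ∨ (∃ u ∈ pvTrigs, ∃ q, 1 ≤ q ∧ q < u.length ∧ v = u.drop q)

theorem pvVOK_tail {c : Char} {v : List Char} (h : pvVOK (c :: v)) : pvVOK v := by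
  have htail : ∀ (w : List Char) (q : Nat), List.drop q w = c :: v → List.drop (q + 1) w = v := by
    intro w q hq
    rw [← List.tail_drop, hq]; rfl
  rcases h with h | ⟨kr, hkr, q, hq1, hq2, hv⟩ | ⟨u, hu, q, hq1, hq2, hv⟩
  · exact absurd h (by simp)
  · cases v with
    | nil => exact Or.inl rfl
    | cons y v' =>
      refine Or.inr (Or.inl ⟨kr, hkr, q + 1, by omega, ?_, (htail _ _ hv.symm).symm⟩)
      have : (List.drop (q+1) kr.1).length = kr.1.length - (q+1) := by simp
      rw [htail _ _ hv.symm] at this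
      simp at this; omega
  · cases v with
    | nil => exact Or.inl rfl
    | cons y v' =>
      refine Or.inr (Or.inr ⟨u, hu, q + 1, by omega, ?_, (htail _ _ hv.symm).symm⟩)
      have : (List.drop (q+1) u).length = u.length - (q+1) := by simp
      rw [htail _ _ hv.symm] at this
      simp at this; omega

theorem pvRep_nil (old new : List Char) : pvRep old new [] = [] := by rw [pvRep]

theorem pvRep_cons_neg (old new : List Char) {c : Char} {ts : List Char}
    (h : ¬ old <+: c :: ts) : pvRep old new (c :: ts) = c :: pvRep old new ts := by
  rw [show pvRep old new (c :: ts)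
        = if old.isPrefixOf (c :: ts) then new ++ pvRep old new (List.drop (old.length - 1) ts)
          else c :: pvRep old new ts from by rw [pvRep],
      if_neg (by rw [List.isPrefixOf_iff_prefix]; exact h)]

theorem pvNF (k1 r1 : List Char) (hm : (k1, r1) ∈ pvTable) :
    ∀ (s : List Char), ∀ v, pvVOK v → v <+: pvRep k1 r1 s → v <+: s := by
  intro s
  induction s with
  | nil => intro v _ hpre; rw [pvRep_nil] at hpre; rw [List.prefix_nil.mp hpre]
  | cons c ts ih =>
    intro v hVOK hpre
    by_cases hp : k1 <+: c :: ts
    · obtain ⟨z, hz⟩ := hp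
      rw [← hz] at hpre ⊢
      rw [pvRep_append_self k1 r1 (pv_fact_key_ne_nil _ hm).1] at hpre
      rcases pv_prefix_split hpre with hv1 | hv1
      · rcases hVOK with rfl | ⟨kr, hkr, q, hq1, hq2, rfl⟩ | ⟨u, hu, q, hq1, hq2, rfl⟩
        · exact List.nil_prefix
        · have hfact := (pv_fact_tail_vs_rep kr hkr (k1, r1) hm q hq2 hq1).2 hv1
          rw [hfact, pv_fact_rep_take1 (k1, r1) hm]
          exact (List.take_prefix 1 k1).trans (List.prefix_append _ _)
        · have hfact := (pv_fact_trigtail_vs_rep u hu (k1, r1) hm q hq2 hq1).2 hv1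
          rw [hfact, pv_fact_rep_take1 (k1, r1) hm]
          exact (List.take_prefix 1 k1).trans (List.prefix_append _ _)
      · rcases hVOK with rfl | ⟨kr, hkr, q, hq1, hq2, rfl⟩ | ⟨u, hu, q, hq1, hq2, rfl⟩
        · exact List.nil_prefix
        · exact absurd hv1 (pv_fact_tail_vs_rep kr hkr (k1, r1) hm q hq2 hq1).1
        · exact absurd hv1 (pv_fact_trigtail_vs_rep u hu (k1, r1) hm q hq2 hq1).1
    · rw [pvRep_cons_neg k1 r1 hp] at hpre
      cases v with
      | nil => exact List.nil_prefix
      | cons y v' =>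
        obtain ⟨rfl, hv'⟩ := List.cons_prefix_cons.mp hpre
        exact List.cons_prefix_cons.mpr ⟨rfl, ih v' (pvVOK_tail hVOK) hv'⟩

def pvTrigIn (t : List Char) : Prop := ∃ u ∈ pvTrigs, u <:+: t

theorem pvD_of_trig (text : String) (h : pvTrigIn text.toList) :
    ∃ a ∈ ["Rhode Island", "rhode island", "Los Angeles", "los angeles"],
    ∃ b ∈ ["district of columbia", "south carolina", "south dakota", "san antonio", "san diego"],
      a.toList.getLast? = b.toList.head? ∧ (a.toList ++ b.toList.drop 1) <:+: text.toList := by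
  obtain ⟨u, hu, hinf⟩ := h
  fin_cases hu
  · exact ⟨"Rhode Island", by decide, "district of columbia", by decide, by decide, by
      rw [show ("Rhode Island" : String).toList ++ (("district of columbia" : String).toList).drop 1
            = ("Rhode Islandistrict of columbia" : String).toList from by decide]
      exact hinf⟩
  · exact ⟨"rhode island", by decide, "district of columbia", by decide, by decide, by
      rw [show ("rhode island" : String).toList ++ (("district of columbia" : String).toList).drop 1
            = ("rhode islandistrict of columbia" : String).toList from by decide]
      exact hinf⟩
  · exact ⟨"Los Angeles", by decide, "south carolina", by decide, by decide, by
      rw [show ("Los Angeles" : String).toList ++ (("south carolina" : String).toList).drop 1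
            = ("Los Angelesouth carolina" : String).toList from by decide]
      exact hinf⟩
  · exact ⟨"Los Angeles", by decide, "south dakota", by decide, by decide, by
      rw [show ("Los Angeles" : String).toList ++ (("south dakota" : String).toList).drop 1
            = ("Los Angelesouth dakota" : String).toList from by decide]
      exact hinf⟩
  · exact ⟨"Los Angeles", by decide, "san antonio", by decide, by decide, by
      rw [show ("Los Angeles" : String).toList ++ (("san antonio" : String).toList).drop 1
            = ("Los Angelesan antonio" : String).toList from by decide]
      exact hinf⟩
  · exact ⟨"Los Angeles", by decide, "san diego", by decide, by decide, by
      rw [show ("Los Angeles" : String).toList ++ (("san diego" : String).toList).drop 1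
            = ("Los Angelesan diego" : String).toList from by decide]
      exact hinf⟩
  · exact ⟨"los angeles", by decide, "south carolina", by decide, by decide, by
      rw [show ("los angeles" : String).toList ++ (("south carolina" : String).toList).drop 1
            = ("los angelesouth carolina" : String).toList from by decide]
      exact hinf⟩
  · exact ⟨"los angeles", by decide, "south dakota", by decide, by decide, by
      rw [show ("los angeles" : String).toList ++ (("south dakota" : String).toList).drop 1
            = ("los angelesouth dakota" : String).toList from by decide]
      exact hinf⟩
  · exact ⟨"los angeles", by decide, "san antonio", by decide, by decide, by
      rw [show ("los angeles" : String).toList ++ (("san antonio" : String).toList).drop 1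
            = ("los angelesan antonio" : String).toList from by decide]
      exact hinf⟩
  · exact ⟨"los angeles", by decide, "san diego", by decide, by decide, by
      rw [show ("los angeles" : String).toList ++ (("san diego" : String).toList).drop 1
            = ("los angelesan diego" : String).toList from by decide]
      exact hinf⟩


theorem pv_infix_split : ∀ (a : List Char) {b u : List Char}, u <:+: a ++ b →
    (∃ q < a.length, u <+: List.drop q a ++ b) ∨ u <:+: b := by
  intro a
  induction a with
  | nil => intro b u h; exact Or.inr (by simpa using h)
  | cons x a' ih =>
    intro b u h
    rw [List.cons_append, List.infix_cons_iff] at h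
    rcases h with h | h
    · exact Or.inl ⟨0, by simp, by simpa using h⟩
    · rcases ih h with ⟨q, hq, hpre⟩ | h'
      · exact Or.inl ⟨q + 1, by simpa using Nat.succ_lt_succ hq, by simpa using hpre⟩
      · exact Or.inr h'

theorem pvINF (k1 r1 : List Char) (hm : (k1, r1) ∈ pvTable) :
    ∀ n (s : List Char), s.length ≤ n → ∀ u ∈ pvTrigs, u <:+: pvRep k1 r1 s → u <:+: s := by
  intro n
  induction n with
  | zero =>
    intro s hs u _ hinf
    have : s = [] := List.eq_nil_iff_length_eq_zero.mpr (Nat.le_zero.mp hs)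
    subst this; rw [pvRep_nil] at hinf; exact hinf
  | succ m ih =>
    intro s hs u hu hinf
    cases s with
    | nil => rw [pvRep_nil] at hinf; exact hinf
    | cons c ts =>
      by_cases hp : k1 <+: c :: ts
      · obtain ⟨z, hz⟩ := hp
        rw [← hz] at hinf ⊢
        rw [pvRep_append_self k1 r1 (pv_fact_key_ne_nil _ hm).1] at hinf
        rcases pv_infix_split r1 hinf with ⟨q, hq, hpre⟩ | h'
        · rcases pv_prefix_split hpre with h1 | h1
          · exact absurd h1 (pv_fact_trig_vs_reptail (k1, r1) hm u hu q hq).1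
          · exact absurd h1 (pv_fact_trig_vs_reptail (k1, r1) hm u hu q hq).2
        · have hlen : z.length ≤ m := by
            have := congrArg List.length hz
            have hk1 : 0 < k1.length := List.ne_nil_iff_length_pos.mp (pv_fact_key_ne_nil _ hm).1
            simp at this hs; omega
          exact (ih z hlen u hu h').trans ((List.suffix_append k1 z).isInfix)
      · rw [pvRep_cons_neg k1 r1 hp] at hinf
        rw [List.infix_cons_iff] at hinf ⊢
        rcases hinf with h | h
        · cases u with
          | nil => exact Or.inl List.nil_prefix
          | cons y u' =>
            obtain ⟨rfl, hu'⟩ := List.cons_prefix_cons.mp h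
            have hVOK : pvVOK u' := by
              cases u' with
              | nil => exact Or.inl rfl
              | cons a b =>
                refine Or.inr (Or.inr ⟨y :: a :: b, hu, 1, le_rfl, by simp, by simp⟩)
            exact Or.inl (List.cons_prefix_cons.mpr ⟨rfl, pvNF k1 r1 hm ts u' hVOK hu'⟩)
        · exact Or.inr (ih ts (by simpa using hs) u hu h)

theorem pvPRES (k1 r1 : List Char) (hm : (k1, r1) ∈ pvTable) (t : List Char)
    (h : ¬ pvTrigIn t) : ¬ pvTrigIn (pvRep k1 r1 t) := by
  rintro ⟨u, hu, hinf⟩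
  exact h ⟨u, hu, pvINF k1 r1 hm t.length t le_rfl u hu hinf⟩

-- ===== scan lemmas =====

theorem pvScanS_nil_table : ∀ t, pvScanS [] t = t := by
  intro t
  induction t with
  | nil => rw [pvScanS]
  | cons c ts ih => rw [pvScanS]; simp [List.find?]; exact ih

theorem pvScanS_cons_none {K : List (List Char × List Char)} {c : Char} {ts : List Char}
    (h : K.find? (fun kr => kr.1.isPrefixOf (c :: ts)) = none) :
    pvScanS K (c :: ts) = c :: pvScanS K ts := by
  rw [pvScanS, h]

theorem pvScanS_match {K : List (List Char × List Char)} {kr : List Char × List Char}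
    {t z : List Char} (hfind : K.find? (fun p => p.1.isPrefixOf t) = some kr)
    (hk : kr.1 ≠ []) (ht : t = kr.1 ++ z) :
    pvScanS K t = kr.2 ++ pvScanS K z := by
  obtain ⟨a, k'', hk1⟩ : ∃ a l, kr.1 = a :: l := by
    cases hc : kr.1 with
    | nil => exact absurd hc hk
    | cons a l => exact ⟨a, l, rfl⟩
  subst ht
  rw [hk1, List.cons_append] at hfind ⊢
  rw [pvScanS, hfind]
  show kr.2 ++ pvScanS K (List.drop (kr.1.length - 1) (k'' ++ z)) = kr.2 ++ pvScanS K z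
  congr 1
  rw [hk1]
  simp only [List.length_cons, Nat.add_sub_cancel, List.drop_left]

theorem pvScanS_split {K : List (List Char × List Char)} (u : List Char) {x : List Char}
    (h : ∀ j < u.length, K.find? (fun kr => kr.1.isPrefixOf (List.drop j u ++ x)) = none) :
    pvScanS K (u ++ x) = u ++ pvScanS K x := by
  induction u with
  | nil => rfl
  | cons d u' ih =>
    have h0 := h 0 (by simp)
    simp only [List.drop_zero] at h0
    rw [List.cons_append] at h0 ⊢
    rw [pvScanS, h0]
    rw [ih (by intro j hj; have := h (j+1) (by simpa using Nat.succ_lt_succ hj); simpa using this)]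
    simp

theorem pv_find_uniq {K : List (List Char × List Char)} {kr : List Char × List Char}
    {x : List Char} (hmem : kr ∈ K) (hmatch : kr.1.isPrefixOf x = true)
    (huniq : ∀ kr' ∈ K, kr'.1.isPrefixOf x = true → kr' = kr) :
    K.find? (fun p => p.1.isPrefixOf x) = some kr := by
  induction K with
  | nil => exact absurd hmem (by simp)
  | cons a K' ih =>
    by_cases ha : a.1.isPrefixOf x = true
    · rw [List.find?_cons, ha, huniq a (by simp) ha]
    · have ha' : a.1.isPrefixOf x = false := by rw [Bool.eq_false_iff]; exact ha
      rw [List.find?_cons, ha']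
      have hmem' : kr ∈ K' := by
        rcases List.mem_cons.mp hmem with rfl | h'
        · exact absurd hmatch ha
        · exact h'
      exact ih hmem' (fun kr' h1 h2 => huniq kr' (List.mem_cons_of_mem _ h1) h2)

-- ===== the step and the outer induction =====

theorem pvScanS_nil (K : List (List Char × List Char)) : pvScanS K [] = [] := by rw [pvScanS]

theorem pvVOK_drop1 (kr : List Char × List Char) (h : kr ∈ pvTable) : pvVOK (kr.1.drop 1) := by
  cases hd : kr.1.drop 1 with
  | nil => exact Or.inl rfl
  | cons a b =>
    refine Or.inr (Or.inl ⟨kr, h, 1, le_rfl, ?_, hd.symm⟩)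
    have := congrArg List.length hd
    simp at this; omega

theorem pvTrigIn_mono {x y : List Char} (h : x <:+: y) : pvTrigIn x → pvTrigIn y := by
  rintro ⟨u, hu, hinf⟩; exact ⟨u, hu, hinf.trans h⟩

theorem pvSTEP (k1 r1 : List Char) (hm : (k1, r1) ∈ pvTable)
    (K' : List (List Char × List Char)) (hK : ∀ kr ∈ K', kr ∈ pvTable) :
    ∀ n (s : List Char), s.length ≤ n → ¬ pvTrigIn s →
      pvScanS K' (pvRep k1 r1 s) = pvScanS ((k1, r1) :: K') s := by
  have hk1ne : k1 ≠ [] := (pv_fact_key_ne_nil _ hm).1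
  intro n
  induction n with
  | zero =>
    intro s hs _
    have : s = [] := List.eq_nil_iff_length_eq_zero.mpr (Nat.le_zero.mp hs)
    subst this; rw [pvRep_nil, pvScanS_nil, pvScanS_nil]
  | succ m ih =>
    intro s hs hT
    cases s with
    | nil => rw [pvRep_nil, pvScanS_nil, pvScanS_nil]
    | cons c ts =>
      by_cases hp : k1 <+: c :: ts
      · -- the pass key matches at the front
        obtain ⟨z, hz⟩ := hp
        rw [← hz] at hs hT ⊢
        have hlenz : z.length ≤ m := by
          have hk1 : 0 < k1.length := List.ne_nil_iff_length_pos.mp hk1ne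
          simp at hs; omega
        have hTz : ¬ pvTrigIn z := fun h => hT (pvTrigIn_mono (List.suffix_append k1 z).isInfix h)
        rw [pvRep_append_self k1 r1 hk1ne]
        have hsplit : ∀ j < r1.length,
            K'.find? (fun kr => kr.1.isPrefixOf (List.drop j r1 ++ pvRep k1 r1 z)) = none := by
          intro j hj
          rw [List.find?_eq_none]
          intro kr hkr
          simp only [Bool.not_eq_true]
          rw [← Bool.not_eq_true, List.isPrefixOf_iff_prefix]
          intro hpre
          rcases pv_prefix_split hpre with h1 | h1
          · exact (pv_fact_reptail_vs_key (k1, r1) hm kr (hK _ hkr) j hj).1 h1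
          · obtain ⟨hq, htake, htrig⟩ := (pv_fact_reptail_vs_key (k1, r1) hm kr (hK _ hkr) j hj).2 h1
            have hd : kr.1.drop 1 <+: pvRep k1 r1 z := by
              have h4 : kr.1.take 1 ++ kr.1.drop 1 <+: kr.1.take 1 ++ pvRep k1 r1 z := by
                rw [List.take_append_drop, ← htake]; exact hpre
              exact (List.prefix_append_right_inj _).mp h4
            have hdz := pvNF k1 r1 hm z _ (pvVOK_drop1 kr (hK _ hkr)) hd
            exact hT ⟨k1 ++ kr.1.drop 1, htrig,
              ((List.prefix_append_right_inj k1).mpr hdz).isInfix⟩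
        rw [pvScanS_split r1 hsplit]
        have hfindKS : ((k1, r1) :: K').find? (fun p => p.1.isPrefixOf (k1 ++ z)) = some (k1, r1) := by
          rw [List.find?_cons, show ((k1, r1).1.isPrefixOf (k1 ++ z)) = true from by
            rw [List.isPrefixOf_iff_prefix]; exact List.prefix_append _ _]
        rw [pvScanS_match hfindKS hk1ne rfl, ih z hlenz hTz]
      · -- the pass key does not match at the front
        cases hf : K'.find? (fun kr => kr.1.isPrefixOf (c :: ts)) with
        | some kr' =>
          have hmem' : kr' ∈ K' := List.mem_of_find?_eq_some hf
          have hmemT : kr' ∈ pvTable := hK _ hmem'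
          have hne' : kr'.1 ≠ [] := (pv_fact_key_ne_nil _ hmemT).1
          have hpre' : kr'.1 <+: c :: ts := by
            have := List.find?_some hf
            rw [List.isPrefixOf_iff_prefix] at this
            exact this
          obtain ⟨z', hz'⟩ := hpre'
          have hkne : kr'.1 ≠ k1 := by
            intro h; apply hp; rw [← h]; exact ⟨z', hz'⟩
          rw [← hz'] at hs hT hf ⊢
          have hlenz : z'.length ≤ m := by
            have : 0 < kr'.1.length := List.ne_nil_iff_length_pos.mp hne'
            simp at hs; omega
          have hTz : ¬ pvTrigIn z' := fun h => hT (pvTrigIn_mono (List.suffix_append kr'.1 z').isInfix h)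
          have hrsplit : ∀ j < kr'.1.length, ¬ k1 <+: (List.drop j kr'.1 ++ z') := by
            intro j hj hpre2
            rcases Nat.eq_zero_or_pos j with rfl | hj1
            · simp only [List.drop_zero] at hpre2
              rcases pv_prefix_split hpre2 with h1 | h1
              · exact pv_fact_no_prefix (k1, r1) hm kr' hmemT (fun h => hkne h.symm) h1
              · exact pv_fact_no_prefix kr' hmemT (k1, r1) hm hkne h1
            · rcases pv_prefix_split hpre2 with h1 | h1
              · exact (pv_fact_keytail_vs_key kr' hmemT (k1, r1) hm j hj hj1).1 h1
              · obtain ⟨hq, htake, htrig⟩ := (pv_fact_keytail_vs_key kr' hmemT (k1, r1) hm j hj hj1).2 h1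
                have hd : k1.drop 1 <+: z' := by
                  have h4 : k1.take 1 ++ k1.drop 1 <+: k1.take 1 ++ z' := by
                    rw [List.take_append_drop, ← htake]; exact hpre2
                  exact (List.prefix_append_right_inj _).mp h4
                exact hT ⟨kr'.1 ++ k1.drop 1, htrig,
                  ((List.prefix_append_right_inj kr'.1).mpr hd).isInfix⟩
          rw [pvRep_split k1 r1 kr'.1 z' hrsplit]
          have hfind2 : K'.find? (fun p => p.1.isPrefixOf (kr'.1 ++ pvRep k1 r1 z')) = some kr' := by
            apply pv_find_uniq hmem'
            · rw [List.isPrefixOf_iff_prefix]; exact List.prefix_append _ _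
            · intro kr'' h1 h2
              rw [List.isPrefixOf_iff_prefix] at h2
              by_cases he : kr''.1 = kr'.1
              · exact pv_fact_key_unique kr'' (hK _ h1) kr' hmemT he
              · rcases pv_prefix_split h2 with h3 | h3
                · exact absurd h3 (pv_fact_no_prefix kr'' (hK _ h1) kr' hmemT he)
                · exact absurd h3 (pv_fact_no_prefix kr' hmemT kr'' (hK _ h1) (fun h => he h.symm))
          rw [pvScanS_match hfind2 hne' rfl]
          have hfindKS : ((k1, r1) :: K').find? (fun p => p.1.isPrefixOf (kr'.1 ++ z')) = some kr' := by
            rw [List.find?_cons, show ((k1, r1).1.isPrefixOf (kr'.1 ++ z')) = false from by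
              rw [← Bool.not_eq_true, List.isPrefixOf_iff_prefix]; exact fun h => hp (hz' ▸ h)]
            exact hf
          rw [pvScanS_match hfindKS hne' rfl, ih z' hlenz hTz]
        | none =>
          rw [pvRep_cons_neg k1 r1 hp]
          have hfind2 : K'.find? (fun kr => kr.1.isPrefixOf (c :: pvRep k1 r1 ts)) = none := by
            rw [List.find?_eq_none]
            intro kr hkr
            simp only [Bool.not_eq_true]
            rw [← Bool.not_eq_true, List.isPrefixOf_iff_prefix]
            intro hpre2
            cases hk : kr.1 with
            | nil => exact (pv_fact_key_ne_nil _ (hK _ hkr)).1 hk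
            | cons y k'' =>
              rw [hk] at hpre2
              obtain ⟨hyc, hk''⟩ := List.cons_prefix_cons.mp hpre2
              have hVOK : pvVOK k'' := by
                have := pvVOK_drop1 kr (hK _ hkr)
                rw [hk] at this
                simpa using this
              have := pvNF k1 r1 hm ts k'' hVOK hk''
              have hmatch : kr.1 <+: c :: ts := by
                rw [hk]; exact List.cons_prefix_cons.mpr ⟨hyc, this⟩
              have := List.find?_eq_none.mp hf kr hkr
              rw [List.isPrefixOf_iff_prefix] at this
              exact this hmatch
          rw [pvScanS_cons_none hfind2]
          have hfindKS : ((k1, r1) :: K').find? (fun kr => kr.1.isPrefixOf (c :: ts)) = none := by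
            rw [List.find?_cons, show (((k1, r1).1.isPrefixOf (c :: ts)) = false) from by
              rw [← Bool.not_eq_true, List.isPrefixOf_iff_prefix]; exact hp]
            exact hf
          rw [pvScanS_cons_none hfindKS, ih ts (by simpa using hs)
            (fun h => hT (pvTrigIn_mono (List.suffix_cons c ts).isInfix h))]

theorem pvOUTER : ∀ (K : List (List Char × List Char)), (∀ kr ∈ K, kr ∈ pvTable) →
    ∀ t, ¬ pvTrigIn t →
      K.foldl (fun s kr => pvRep kr.1 kr.2 s) t = pvScanS K t := by
  intro K
  induction K with
  | nil => intro _ t _; simpa using (pvScanS_nil_table t).symm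
  | cons kr K' ih =>
    intro hK t hT
    rw [List.foldl_cons,
        ih (fun x hx => hK x (List.mem_cons_of_mem _ hx)) (pvRep kr.1 kr.2 t)
          (pvPRES kr.1 kr.2 (hK kr (by simp)) t hT)]
    exact pvSTEP kr.1 kr.2 (hK kr (by simp)) K'
      (fun x hx => hK x (List.mem_cons_of_mem _ hx)) t.length t le_rfl hT

-- ===== tying the A port to the fold of pvRep over pvTable =====

theorem pvBuildTable_flat : ∀ (l : List String),
    pvBuildTable l = l.flatMap (fun p =>
      [(p.toList, PySem.Chars.replace p.toList [' '] []),
       (PySem.Chars.lower p.toList, PySem.Chars.replace (PySem.Chars.lower p.toList) [' '] [])]) := by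
  intro l
  unfold pvBuildTable
  rw [show (fun (tb : List (List Char × List Char)) (p : String) =>
        let low := PySem.Chars.lower p.toList
        tb ++ [(p.toList, PySem.Chars.replace p.toList [' '] [])]
           ++ [(low, PySem.Chars.replace low [' '] [])])
      = (fun tb p => tb ++
          [(p.toList, PySem.Chars.replace p.toList [' '] []),
           (PySem.Chars.lower p.toList, PySem.Chars.replace (PySem.Chars.lower p.toList) [' '] [])]) from by
        funext tb p; simp]
  rw [PySem.List.foldl_append_eq_flatMap]
  simp

theorem pvA_chars : ∀ (l : List String) (t : List Char),
    (∀ p ∈ l, p.toList ≠ [] ∧ PySem.Chars.lower p.toList ≠ []) →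
    (l.foldl (fun t phrase =>
      let phrase_lower := PySem.Str.lower phrase
      let t := PySem.Str.replace t phrase (PySem.Str.replace phrase " " "")
      PySem.Str.replace t phrase_lower (PySem.Str.replace phrase_lower " " "")) (String.ofList t)).toList
    = (pvBuildTable l).foldl (fun s kr => pvRep kr.1 kr.2 s) t := by
  intro l
  induction l with
  | nil =>
    intro t _
    simp [pvBuildTable, String.toList_ofList]
  | cons p l ih =>
    intro t hne
    obtain ⟨hp1, hp2⟩ := hne p (by simp)
    rw [List.foldl_cons]
    have hb2 : (let phrase_lower := PySem.Str.lower p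
        let t := PySem.Str.replace (String.ofList t) p (PySem.Str.replace p " " "")
        PySem.Str.replace t phrase_lower (PySem.Str.replace phrase_lower " " ""))
        = String.ofList (pvRep (PySem.Chars.lower p.toList) (PySem.Chars.replace (PySem.Chars.lower p.toList) [' '] [])
            (pvRep p.toList (PySem.Chars.replace p.toList [' '] []) t)) := by
      show PySem.Str.replace (PySem.Str.replace (String.ofList t) p (PySem.Str.replace p " " ""))
            (PySem.Str.lower p) (PySem.Str.replace (PySem.Str.lower p) " " "") = _
      apply String.toList_inj.mp
      simp only [PySem.Str.toList_replace, PySem.Str.toList_lower, String.toList_ofList,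
                 show (" " : String).toList = [' '] from by decide,
                 show ("" : String).toList = [] from by decide]
      rw [pv_replace_eq_pvRep _ _ hp1, pv_replace_eq_pvRep _ _ hp2]
    rw [hb2, ih _ (fun q hq => hne q (List.mem_cons_of_mem _ hq))]
    rw [show pvBuildTable (p :: l)
          = [(p.toList, PySem.Chars.replace p.toList [' '] []),
             (PySem.Chars.lower p.toList, PySem.Chars.replace (PySem.Chars.lower p.toList) [' '] [])]
            ++ pvBuildTable l from by
        rw [pvBuildTable_flat, List.flatMap_cons, ← pvBuildTable_flat]]
    rw [List.foldl_append, List.foldl_cons, List.foldl_cons]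
    rfl

-- ===== VERDICT (by name: the statement is the Claim_ definition above) =====
theorem filter_text_for_nltk_spec : Claim_equal_filter_text_for_nltk := by
  intro text lower_flag _ hPre
  have hT : ¬ pvTrigIn text.toList := fun h => hPre (pvD_of_trig text h)
  have hchars : (pvPhrases.foldl (fun t phrase =>
      let phrase_lower := PySem.Str.lower phrase
      let t := PySem.Str.replace t phrase (PySem.Str.replace phrase " " "")
      PySem.Str.replace t phrase_lower (PySem.Str.replace phrase_lower " " "")) text).toList
      = pvScanS pvTable text.toList := by
    have h1 := pvA_chars pvPhrases text.toList (by decide)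
    rw [String.ofList_toList] at h1
    rw [h1]
    exact pvOUTER pvTable (fun x hx => hx) text.toList hT
  have hmain : pvPhrases.foldl (fun t phrase =>
      let phrase_lower := PySem.Str.lower phrase
      let t := PySem.Str.replace t phrase (PySem.Str.replace phrase " " "")
      PySem.Str.replace t phrase_lower (PySem.Str.replace phrase_lower " " "")) text
      = String.ofList (pvScanT pvTable text.toList) := by
    rw [pvScanT_eq_S, ← hchars, String.ofList_toList]
  show (let t := pvPhrases.foldl _ text
        if lower_flag then PySem.Str.lower t else t) = _
  rw [filter_text_for_nltk_alt]
  simp only []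
  rw [hmain]
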